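-- pv_equiv track=rewrite | github.com/vedantparmar12/PowerSuite-Pro | professional-ppt-skill/scripts/ppt_creator.py | _detect_audience
-- ===== SOURCE A (Python) =====
-- def _detect_audience(prompt: str) -> str:
--     """Detect intended audience from prompt context"""
--     if any(word in prompt.lower() for word in ['board', 'executive', 'c-level', 'senior']):
--         return 'executives'
--     elif any(word in prompt.lower() for word in ['team', 'colleagues', 'staff', 'employees']):
--         return 'internal'
--     elif any(word in prompt.lower() for word in ['client', 'customer', 'prospect', 'buyer']):
--         return 'external'
--     else:
--         return 'general'
-- ===== SOURCE B (Python) =====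
-- _KEYWORDS = {
--     'board': 0, 'executive': 0, 'c-level': 0, 'senior': 0,
--     'team': 1, 'colleagues': 1, 'staff': 1, 'employees': 1,
--     'client': 2, 'customer': 2, 'prospect': 2, 'buyer': 2,
-- }
-- _LABELS = ['executives', 'internal', 'external', 'general']
--
-- def _detect_audience(prompt: str) -> str:
--     """Detect intended audience from prompt context"""
--     # Text-driven scan: walk the prompt once; at each position see which
--     # keywords start there, and keep the best (lowest) priority seen.
--     p = prompt.lower()
--     best = 3
--     for i in range(len(p)):
--         for kw, pr in _KEYWORDS.items():
--             if pr < best and p.startswith(kw, i):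
--                 best = pr
--     return _LABELS[best]
-- ===== Notes on version B (the rewrite author's own statement) =====
-- stated objective: alternative
-- what changed: Instead of testing each keyword group with a substring-membership call in an if/elif cascade, B lowercases once and walks the prompt position by position, checking which keywords start at each position and keeping the minimum priority seen; the label is looked up by that priority at the end (trades the C-level substring search for an explicit scan, so it is slower in CPython).
import Mathlib
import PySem

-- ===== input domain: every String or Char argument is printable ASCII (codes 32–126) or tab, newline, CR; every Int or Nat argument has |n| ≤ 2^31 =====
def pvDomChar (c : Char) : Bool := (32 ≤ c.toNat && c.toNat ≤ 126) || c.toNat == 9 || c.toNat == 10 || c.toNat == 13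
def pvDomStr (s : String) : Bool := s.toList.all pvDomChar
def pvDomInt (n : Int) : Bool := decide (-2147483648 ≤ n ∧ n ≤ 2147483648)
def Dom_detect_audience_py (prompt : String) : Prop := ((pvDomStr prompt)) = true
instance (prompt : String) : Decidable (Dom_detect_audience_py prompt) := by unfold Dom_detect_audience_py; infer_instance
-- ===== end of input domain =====

-- B replaces A's keyword-driven if/elif cascade by a text-driven scan: one pass over the lowered prompt's positions, keeping the minimum priority of any keyword starting there (objective: alternative).


-- ===== PORT A =====
-- Port of A: if/elif cascade, prompt.lower() recomputed per branch as in A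
def detect_audience_py (prompt : String) : String :=
  if ["board","executive","c-level","senior"].any (fun w => PySem.Str.isIn w (PySem.Str.lower prompt)) then "executives"
  else if ["team","colleagues","staff","employees"].any (fun w => PySem.Str.isIn w (PySem.Str.lower prompt)) then "internal"
  else if ["client","customer","prospect","buyer"].any (fun w => PySem.Str.isIn w (PySem.Str.lower prompt)) then "external"
  else "general"

-- ===== PORT B =====
-- Port of B (Source B): the _KEYWORDS dict in its insertion order (keyword, priority)
def pvKws : List (List Char × Nat) :=
  [("board".toList, 0), ("executive".toList, 0), ("c-level".toList, 0), ("senior".toList, 0),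
   ("team".toList, 1), ("colleagues".toList, 1), ("staff".toList, 1), ("employees".toList, 1),
   ("client".toList, 2), ("customer".toList, 2), ("prospect".toList, 2), ("buyer".toList, 2)]

def pvLabels : List String := ["executives", "internal", "external", "general"]

-- the loop 'for i in range(len(p)): for kw, pr in _KEYWORDS.items(): if pr < best and p.startswith(kw, i): best = pr'
-- ported as structural recursion over the suffixes p[i:] (p.startswith(kw, i) = kw is a prefix of p[i:])
def pvScan : List Char → Nat → Nat
  | [], best => best
  | c :: rest, best =>
      pvScan rest (pvKws.foldl
        (fun b e => if e.2 < b ∧ PySem.Chars.startswith (c :: rest) e.1 then e.2 else b) best)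

def detect_audience_py_alt (prompt : String) : String :=
  -- return _LABELS[best]; best ≤ 3 always, so the index is in range
  pvLabels.getD (pvScan (PySem.Str.lower prompt).toList 3) "general"

-- ===== PRECONDITION & SPEC =====
def Spec_detect_audience_py (prompt : String) (out : String) : Prop := out = detect_audience_py_alt prompt
instance (prompt : String) (out : String) : Decidable (Spec_detect_audience_py prompt out) := by unfold Spec_detect_audience_py; infer_instance

-- ===== CLAIM (what is proved, stated in full; the proofs are below) =====
def Claim_equal_detect_audience_py : Prop := ∀ (prompt : String), Dom_detect_audience_py prompt → Spec_detect_audience_py prompt (detect_audience_py prompt)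

-- ===== LEMMAS AND PROOFS =====

-- the inner fold never increases the accumulator
theorem pvFold_le (s : List Char) (l : List (List Char × Nat)) (b : Nat) :
    l.foldl (fun b e => if e.2 < b ∧ PySem.Chars.startswith s e.1 then e.2 else b) b ≤ b := by
  induction l generalizing b with
  | nil => exact Nat.le_refl b
  | cons e t ih =>
      simp only [List.foldl_cons]
      split_ifs with h
      · exact Nat.le_trans (ih e.2) (Nat.le_of_lt h.1)
      · exact ih b

-- a matching entry bounds the inner fold
theorem pvFold_le_of_mem (s : List Char) (l : List (List Char × Nat)) (b : Nat)
    (e : List Char × Nat) (he : e ∈ l) (hc : PySem.Chars.startswith s e.1 = true) :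
    l.foldl (fun b e => if e.2 < b ∧ PySem.Chars.startswith s e.1 then e.2 else b) b ≤ e.2 := by
  induction l generalizing b with
  | nil => cases he
  | cons e' t ih =>
      simp only [List.foldl_cons]
      rcases List.mem_cons.mp he with h | h
      · subst h
        have hstep : (if e.2 < b ∧ PySem.Chars.startswith s e.1 then e.2 else b) ≤ e.2 := by
          split_ifs with hh
          · exact Nat.le_refl _
          · rcases Nat.lt_or_ge e.2 b with hlt | hge
            · exact absurd ⟨hlt, hc⟩ hh
            · exact hge
        exact Nat.le_trans (pvFold_le s t _) hstep
      · exact ih _ h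

-- pvScan never increases the accumulator
theorem pvScan_le_init (s : List Char) (b : Nat) : pvScan s b ≤ b := by
  induction s generalizing b with
  | nil => exact Nat.le_refl b
  | cons c rest ih =>
      exact Nat.le_trans (ih _) (pvFold_le (c :: rest) pvKws b)

-- (i) any keyword occurring in s bounds the scan by its priority
theorem pvScan_le_aux (e : List Char × Nat) (he : e ∈ pvKws) (hne : e.1 ≠ [])
    (s : List Char) (b j : Nat) (hj : e.1 <+: s.drop j) : pvScan s b ≤ e.2 := by
  induction s generalizing b j with
  | nil =>
      exfalso
      exact hne (List.prefix_nil.mp (by simpa using hj))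
  | cons c rest ih =>
      cases j with
      | zero =>
          have hc : PySem.Chars.startswith (c :: rest) e.1 = true :=
            (PySem.Chars.startswith_iff _ _).mpr (by simpa using hj)
          exact Nat.le_trans (pvScan_le_init rest _) (pvFold_le_of_mem (c :: rest) pvKws b e he hc)
      | succ j' =>
          exact ih _ j' (by simpa using hj)

theorem pvScan_le (s : List Char) (b : Nat) (e : List Char × Nat) (he : e ∈ pvKws)
    (hne : e.1 ≠ []) (hin : PySem.Chars.isIn e.1 s = true) : pvScan s b ≤ e.2 := by
  obtain ⟨j, hj⟩ := (PySem.Chars.exists_prefix_drop_iff_isIn e.1 s).mpr hin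
  exact pvScan_le_aux e he hne s b j hj

-- (ii) the scan result is the initial value or the priority of a keyword occurring in s
theorem pvFold_cases (s : List Char) (l : List (List Char × Nat)) (b : Nat) :
    l.foldl (fun b e => if e.2 < b ∧ PySem.Chars.startswith s e.1 then e.2 else b) b = b ∨
    ∃ e ∈ l, l.foldl (fun b e => if e.2 < b ∧ PySem.Chars.startswith s e.1 then e.2 else b) b = e.2 ∧
      PySem.Chars.startswith s e.1 = true := by
  induction l generalizing b with
  | nil => exact Or.inl rfl
  | cons e' t ih =>
      simp only [List.foldl_cons]
      split_ifs with h
      · rcases ih e'.2 with h1 | ⟨e, hmem, heq, hsw⟩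
        · exact Or.inr ⟨e', List.mem_cons_self, h1, h.2⟩
        · exact Or.inr ⟨e, List.mem_cons_of_mem _ hmem, heq, hsw⟩
      · rcases ih b with h1 | ⟨e, hmem, heq, hsw⟩
        · exact Or.inl h1
        · exact Or.inr ⟨e, List.mem_cons_of_mem _ hmem, heq, hsw⟩

theorem pvStartswith_isIn (s : List Char) (p : List Char)
    (h : PySem.Chars.startswith s p = true) : PySem.Chars.isIn p s = true :=
  (PySem.Chars.exists_prefix_drop_iff_isIn p s).mp ⟨0, by simpa using (PySem.Chars.startswith_iff s p).mp h⟩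

theorem pvIsIn_cons (c : Char) (rest : List Char) (p : List Char)
    (h : PySem.Chars.isIn p rest = true) : PySem.Chars.isIn p (c :: rest) = true := by
  rw [PySem.Chars.isIn_iff_infix] at h ⊢
  exact h.trans (List.infix_cons (List.infix_refl rest))

theorem pvScan_cases (s : List Char) (b : Nat) :
    pvScan s b = b ∨ ∃ e ∈ pvKws, pvScan s b = e.2 ∧ PySem.Chars.isIn e.1 s = true := by
  induction s generalizing b with
  | nil => exact Or.inl rfl
  | cons c rest ih =>
      rcases ih (pvKws.foldl (fun b e => if e.2 < b ∧ PySem.Chars.startswith (c :: rest) e.1 then e.2 else b) b) with h1 | ⟨e, hmem, heq, hin⟩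
      · rcases pvFold_cases (c :: rest) pvKws b with h2 | ⟨e, hmem, heq, hsw⟩
        · exact Or.inl (by rw [pvScan, h1, h2])
        · exact Or.inr ⟨e, hmem, by rw [pvScan, h1, heq], pvStartswith_isIn _ _ hsw⟩
      · exact Or.inr ⟨e, hmem, by rw [pvScan, heq], pvIsIn_cons c rest e.1 hin⟩

-- the cascade and the scan agree for every character list s
theorem pvMain (s : List Char) :
    (if (["board","executive","c-level","senior"] : List String).any (fun w => PySem.Chars.isIn w.toList s) then "executives"
     else if (["team","colleagues","staff","employees"] : List String).any (fun w => PySem.Chars.isIn w.toList s) then "internal"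
     else if (["client","customer","prospect","buyer"] : List String).any (fun w => PySem.Chars.isIn w.toList s) then "external"
     else "general")
    = pvLabels.getD (pvScan s 3) "general" := by
  by_cases h0 : (["board","executive","c-level","senior"] : List String).any (fun w => PySem.Chars.isIn w.toList s) = true
  · rw [if_pos h0]
    simp only [List.any_eq_true] at h0
    obtain ⟨w, hw, hin⟩ := h0
    have hle : pvScan s 3 ≤ 0 := by
      simp only [List.mem_cons, List.not_mem_nil, or_false] at hw
      rcases hw with rfl | rfl | rfl | rfl <;>
        exact pvScan_le s 3 (_, 0) (by decide) (by decide) hin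
    rw [Nat.le_zero.mp hle]; rfl
  · rw [if_neg h0]
    simp only [List.any_eq_true, not_exists, not_and] at h0
    by_cases h1 : (["team","colleagues","staff","employees"] : List String).any (fun w => PySem.Chars.isIn w.toList s) = true
    · rw [if_pos h1]
      simp only [List.any_eq_true] at h1
      obtain ⟨w, hw, hin⟩ := h1
      have hle : pvScan s 3 ≤ 1 := by
        simp only [List.mem_cons, List.not_mem_nil, or_false] at hw
        rcases hw with rfl | rfl | rfl | rfl <;>
          exact pvScan_le s 3 (_, 1) (by decide) (by decide) hin
      rcases pvScan_cases s 3 with hc | ⟨e, hmem, heq, hin'⟩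
      · rw [hc] at hle; exact absurd hle (by decide)
      · simp only [pvKws, List.mem_cons, List.not_mem_nil, or_false] at hmem
        rcases hmem with rfl | rfl | rfl | rfl | rfl | rfl | rfl | rfl | rfl | rfl | rfl | rfl <;>
          first
            | exact absurd hin' (h0 _ (by decide))
            | (rw [heq]; rfl)
            | (rw [heq] at hle; exact absurd hle (by decide))
    · rw [if_neg h1]
      simp only [List.any_eq_true, not_exists, not_and] at h1
      by_cases h2 : (["client","customer","prospect","buyer"] : List String).any (fun w => PySem.Chars.isIn w.toList s) = true
      · rw [if_pos h2]
        simp only [List.any_eq_true] at h2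
        obtain ⟨w, hw, hin⟩ := h2
        have hle : pvScan s 3 ≤ 2 := by
          simp only [List.mem_cons, List.not_mem_nil, or_false] at hw
          rcases hw with rfl | rfl | rfl | rfl <;>
            exact pvScan_le s 3 (_, 2) (by decide) (by decide) hin
        rcases pvScan_cases s 3 with hc | ⟨e, hmem, heq, hin'⟩
        · rw [hc] at hle; exact absurd hle (by decide)
        · simp only [pvKws, List.mem_cons, List.not_mem_nil, or_false] at hmem
          rcases hmem with rfl | rfl | rfl | rfl | rfl | rfl | rfl | rfl | rfl | rfl | rfl | rfl <;>
            first
              | exact absurd hin' (h0 _ (by decide))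
              | exact absurd hin' (h1 _ (by decide))
              | (rw [heq]; rfl)
      · rw [if_neg h2]
        simp only [List.any_eq_true, not_exists, not_and] at h2
        rcases pvScan_cases s 3 with hc | ⟨e, hmem, heq, hin'⟩
        · rw [hc]; rfl
        · simp only [pvKws, List.mem_cons, List.not_mem_nil, or_false] at hmem
          rcases hmem with rfl | rfl | rfl | rfl | rfl | rfl | rfl | rfl | rfl | rfl | rfl | rfl <;>
            first
              | exact absurd hin' (h0 _ (by decide))
              | exact absurd hin' (h1 _ (by decide))
              | exact absurd hin' (h2 _ (by decide))

-- ===== VERDICT (by name: the statement is the Claim_ definition above) =====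
theorem detect_audience_py_spec : Claim_equal_detect_audience_py := by
  intro prompt _
  unfold Spec_detect_audience_py detect_audience_py detect_audience_py_alt
  simp only [PySem.Str.isIn_eq]
  exact pvMain (PySem.Str.lower prompt).toList
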